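-- pv_equiv track=rewrite | github.com/amani-md/M1-Internship | Metabolic Modeling/efflux_method.py | remove_genes
-- ===== SOURCE A (Python) =====
-- def remove_genes(gpr_str, gene_prefix):
--     """Remove genes with a specific prefix (e.g., 'ENSMUS' or 'ENSG') from the GPR string."""
--     tokens = gpr_str.split(" ")
--     indices_to_remove = set()
--
--     for i in range(len(tokens) - 1, -1, -1):
--         if gene_prefix in tokens[i]:
--             indices_to_remove.update({i - 1, i, i + 1})
--
--     tokens = [tok for idx, tok in enumerate(tokens) if idx not in indices_to_remove]
--     return " ".join(tokens)
-- ===== SOURCE B (Python) =====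
-- def remove_genes(gpr_str, gene_prefix):
--     """Remove genes with a specific prefix (e.g., 'ENSMUS' or 'ENSG') from the GPR string."""
--     tokens = gpr_str.split(" ")
--     n = len(tokens)
--     kept = [t for j, t in enumerate(tokens)
--             if not (gene_prefix in tokens[j]
--                     or (j > 0 and gene_prefix in tokens[j - 1])
--                     or (j + 1 < n and gene_prefix in tokens[j + 1]))]
--     return " ".join(kept)
-- ===== Notes on version B (the rewrite author's own statement) =====
-- stated objective: simpler
-- what changed: B drops A's reverse-scan index-set construction and separate filtering pass: a single pass keeps token j unless the prefix occurs in tokens[j] or in an existing neighbour tokens[j-1]/tokens[j+1], checking bounds locally.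
import Mathlib
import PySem

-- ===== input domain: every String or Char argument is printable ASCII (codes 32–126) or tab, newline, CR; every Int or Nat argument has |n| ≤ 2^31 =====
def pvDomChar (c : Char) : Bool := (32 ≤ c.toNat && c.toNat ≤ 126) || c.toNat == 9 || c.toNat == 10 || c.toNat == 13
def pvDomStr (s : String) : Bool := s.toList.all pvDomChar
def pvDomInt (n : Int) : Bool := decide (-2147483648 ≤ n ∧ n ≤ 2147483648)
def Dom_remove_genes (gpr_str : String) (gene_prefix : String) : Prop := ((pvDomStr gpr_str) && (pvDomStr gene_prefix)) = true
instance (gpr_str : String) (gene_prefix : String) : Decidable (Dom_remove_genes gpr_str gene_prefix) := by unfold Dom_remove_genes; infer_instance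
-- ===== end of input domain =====

-- B drops A's reverse-scan index set and keeps a token by checking its two neighbours locally in one filtering pass (objective: simpler).

-- ===== PORT A =====
-- A: split on " ", mark {i-1,i,i+1} for every token containing the prefix (scanning right to left), keep unmarked tokens, join.
def remove_genes (gpr_str : String) (gene_prefix : String) : String :=
  let tokens := (PySem.Str.split? gpr_str " ").getD []
  let idxs : PySem.Set Int :=
    (PySem.List.pyRange ((tokens.length : Int) - 1) (-1) (-1)).foldl
      (fun s i =>
        if PySem.Str.isIn gene_prefix (PySem.List.pyGetD tokens i "") then
          PySem.Set.update s [i - 1, i, i + 1]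
        else s)
      PySem.Set.empty
  PySem.Str.join " "
    (((PySem.List.enumerate tokens 0).filter
        (fun p => !(PySem.Set.contains idxs p.1))).map (·.2))

-- ===== PORT B =====
-- B: single filtering pass; token j survives unless the prefix occurs in tokens[j] or in an existing neighbour tokens[j-1]/tokens[j+1].
def remove_genes_alt (gpr_str : String) (gene_prefix : String) : String :=
  let tokens := (PySem.Str.split? gpr_str " ").getD []
  let n : Int := tokens.length
  PySem.Str.join " "
    (((PySem.List.enumerate tokens 0).filter
        (fun p =>
          !(PySem.Str.isIn gene_prefix (PySem.List.pyGetD tokens p.1 "")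
            || (decide (0 < p.1) && PySem.Str.isIn gene_prefix (PySem.List.pyGetD tokens (p.1 - 1) ""))
            || (decide (p.1 + 1 < n) && PySem.Str.isIn gene_prefix (PySem.List.pyGetD tokens (p.1 + 1) ""))))).map (·.2))

-- ===== PRECONDITION & SPEC =====
def Spec_remove_genes (gpr_str : String) (gene_prefix : String) (out : String) : Prop := out = remove_genes_alt gpr_str gene_prefix
instance (gpr_str : String) (gene_prefix : String) (out : String) : Decidable (Spec_remove_genes gpr_str gene_prefix out) := by unfold Spec_remove_genes; infer_instance

-- ===== CLAIM (what is proved, stated in full; the proofs are below) =====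
def Claim_equal_remove_genes : Prop := ∀ (gpr_str : String) (gene_prefix : String), Dom_remove_genes gpr_str gene_prefix → Spec_remove_genes gpr_str gene_prefix (remove_genes gpr_str gene_prefix)

-- ===== LEMMAS AND PROOFS =====

/-- Membership in the index set A builds by folding `update s [i-1, i, i+1]` over a list. -/
theorem mem_foldl_marks (P : Int → Bool) (l : List Int) (s : PySem.Set Int) (j : Int) :
    j ∈ l.foldl (fun s i => if P i then PySem.Set.update s [i - 1, i, i + 1] else s) s ↔
      j ∈ s ∨ ∃ i ∈ l, P i = true ∧ (j = i - 1 ∨ j = i ∨ j = i + 1) := by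
  induction l generalizing s with
  | nil => simp
  | cons a l ih =>
    simp only [List.foldl_cons, ih]
    by_cases h : P a = true
    · simp only [if_pos h, PySem.Set.mem_update, List.mem_cons, List.not_mem_nil, or_false]
      constructor
      · rintro ((hs | hj) | ⟨i, hi, hPi, hj⟩)
        · exact Or.inl hs
        · exact Or.inr ⟨a, Or.inl rfl, h, hj⟩
        · exact Or.inr ⟨i, Or.inr hi, hPi, hj⟩
      · rintro (hs | ⟨i, hi, hPi, hj⟩)
        · exact Or.inl (Or.inl hs)
        · rcases hi with rfl | hi
          · exact Or.inl (Or.inr hj)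
          · exact Or.inr ⟨i, hi, hPi, hj⟩
    · simp only [if_neg h, List.mem_cons]
      constructor
      · rintro (hs | ⟨i, hi, hP, hj⟩)
        · exact Or.inl hs
        · exact Or.inr ⟨i, Or.inr hi, hP, hj⟩
      · rintro (hs | ⟨i, (rfl | hi), hP, hj⟩)
        · exact Or.inl hs
        · exact absurd hP h
        · exact Or.inr ⟨i, hi, hP, hj⟩

theorem remove_genes_spec : Claim_equal_remove_genes := by
  unfold Claim_equal_remove_genes Spec_remove_genes
  intro gpr_str gene_prefix _
  simp only [remove_genes, remove_genes_alt]
  set tokens := (PySem.Str.split? gpr_str " ").getD [] with htok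
  set n : Int := (tokens.length : Int) with hn
  set P : Int → Bool := fun i => PySem.Str.isIn gene_prefix (PySem.List.pyGetD tokens i "") with hP
  congr 1
  congr 1
  apply List.filter_congr
  intro p hp
  obtain ⟨k, hk, rfl⟩ := (PySem.List.mem_enumerate_iff tokens 0 p).mp hp
  simp only [zero_add]
  congr 1
  rw [Bool.eq_iff_iff]
  simp only [PySem.Set.contains_iff, mem_foldl_marks, PySem.Set.empty, List.not_mem_nil,
    false_or, PySem.List.mem_pyRange_neg_one, Bool.or_eq_true, Bool.and_eq_true,
    decide_eq_true_eq]
  constructor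
  · rintro ⟨i, ⟨hi0, hi1⟩, hPi, hj | hj | hj⟩
    · have hi : i = (k : Int) + 1 := by omega
      subst hi
      exact Or.inr ⟨by omega, hPi⟩
    · have hi : i = (k : Int) := by omega
      subst hi
      exact Or.inl (Or.inl hPi)
    · have hi : i = (k : Int) - 1 := by omega
      subst hi
      exact Or.inl (Or.inr ⟨by omega, hPi⟩)
  · rintro ((h | ⟨hk0, h⟩) | ⟨hk1, h⟩)
    · exact ⟨(k : Int), ⟨by omega, by omega⟩, h, Or.inr (Or.inl rfl)⟩
    · exact ⟨(k : Int) - 1, ⟨by omega, by omega⟩, h, Or.inr (Or.inr (by omega))⟩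
    · exact ⟨(k : Int) + 1, ⟨by omega, by omega⟩, h, Or.inl (by omega)⟩
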